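-- pv_equiv track=rewrite | github.com/delanowalk/Blackjack | BlackJack simmulaition/Full Game Sumilation/BlackJack2.2.2.py | counting_card
-- ===== SOURCE A (Python) =====
-- def deck_amount(decks):
--     count_A = 4 * decks
--     count_2 = 4 * decks
--     count_3 = 4 * decks
--     count_4 = 4 * decks
--     count_5 = 4 * decks
--     count_6 = 4 * decks
--     count_7 = 4 * decks
--     count_8 = 4 * decks
--     count_9 = 4 * decks
--     count_10 = 4 * decks
--     count_J = 4 * decks
--     count_Q = 4 * decks
--     count_K = 4 * decks
--
--     deck = {
--         'A': [count_A, 11, 1],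
--         '2': [count_2, 2, 2],
--         '3': [count_3, 3, 3],
--         '4': [count_4, 4, 4],
--         '5': [count_5, 5, 5],
--         '6': [count_6, 6, 6],
--         '7': [count_7, 7, 7],
--         '8': [count_8, 8, 8],
--         '9': [count_9, 9, 9],
--         '10': [count_10, 10, 10],
--         'J': [count_J, 10, 10],
--         'Q': [count_Q, 10, 10],
--         'K': [count_K, 10, 10]
--     }
--
--     return deck
--
-- def counting_card(cards_delt, shuffle):
--     cards_delt = cards_delt
--     deck = deck_amount(1)
--     high_low_count = 0
--     i = 0
--     while i < cards_delt:
--         if deck[shuffle[i]][1] > 9: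
--             high_low_count += -1
--             i += 1
--         elif deck[shuffle[i]][1] < 7:
--             high_low_count += 1
--             i += 1
--         else:
--             i += 1
--     return high_low_count
-- ===== SOURCE B (Python) =====
-- LOW = ('2', '3', '4', '5', '6')
-- HIGH = ('10', 'J', 'Q', 'K', 'A')
--
-- def counting_card(cards_delt, shuffle):
--     freq = {}
--     for i in range(cards_delt):
--         card = shuffle[i]
--         freq[card] = freq.get(card, 0) + 1
--     return sum(freq.get(c, 0) for c in LOW) - sum(freq.get(c, 0) for c in HIGH)
-- ===== Notes on version B (the rewrite author's own statement) =====
-- stated objective: alternative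
-- what changed: B replaces A's per-card running counter over a rebuilt 13-entry deck dict with a frequency table built in one indexed pass, then a fixed 10-term pass over the LOW/HIGH card categories.
import Mathlib
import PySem

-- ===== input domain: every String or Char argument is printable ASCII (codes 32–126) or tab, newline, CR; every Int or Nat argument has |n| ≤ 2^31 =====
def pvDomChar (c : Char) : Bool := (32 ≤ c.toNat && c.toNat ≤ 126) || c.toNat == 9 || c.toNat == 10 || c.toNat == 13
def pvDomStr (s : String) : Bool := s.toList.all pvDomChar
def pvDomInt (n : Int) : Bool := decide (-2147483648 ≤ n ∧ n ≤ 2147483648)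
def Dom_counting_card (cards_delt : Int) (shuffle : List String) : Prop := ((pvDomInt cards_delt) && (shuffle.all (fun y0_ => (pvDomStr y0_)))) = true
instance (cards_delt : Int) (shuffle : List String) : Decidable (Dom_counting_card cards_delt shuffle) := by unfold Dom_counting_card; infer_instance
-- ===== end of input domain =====

-- B builds a frequency table over the dealt prefix and then scores the 10 LOW/HIGH
-- categories once, instead of A's per-card running counter over a rebuilt deck dict
-- (alternative decomposition, same asymptotic cost).

-- ===== PORT A =====
def deck_amount (decks : Int) : PySem.Dict String (List Int) :=
  PySem.Dict.ofList [
    ("A", [4 * decks, 11, 1]),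
    ("2", [4 * decks, 2, 2]),
    ("3", [4 * decks, 3, 3]),
    ("4", [4 * decks, 4, 4]),
    ("5", [4 * decks, 5, 5]),
    ("6", [4 * decks, 6, 6]),
    ("7", [4 * decks, 7, 7]),
    ("8", [4 * decks, 8, 8]),
    ("9", [4 * decks, 9, 9]),
    ("10", [4 * decks, 10, 10]),
    ("J", [4 * decks, 10, 10]),
    ("Q", [4 * decks, 10, 10]),
    ("K", [4 * decks, 10, 10])]

-- A's while loop; a `none` from a PySem primitive marks an IndexError/KeyError
-- (excluded by Pre_), where we just return the current accumulator.
def ccLoop (cards_delt : Int) (shuffle : List String) (deck : PySem.Dict String (List Int))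
    (hlc i : Int) : Int :=
  if _h : i < cards_delt then
    match PySem.List.pyGet? shuffle i with
    | none => hlc
    | some card =>
      match deck.get? card with
      | none => hlc
      | some entry =>
        match PySem.List.pyGet? entry 1 with
        | none => hlc
        | some v =>
          if v > 9 then ccLoop cards_delt shuffle deck (hlc + -1) (i + 1)
          else if v < 7 then ccLoop cards_delt shuffle deck (hlc + 1) (i + 1)
          else ccLoop cards_delt shuffle deck hlc (i + 1)
  else hlc
termination_by (cards_delt - i).toNat
decreasing_by all_goals omega

def counting_card (cards_delt : Int) (shuffle : List String) : Int :=
  ccLoop cards_delt shuffle (deck_amount 1) 0 0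

-- ===== PORT B =====
def pvLOW : List String := ["2", "3", "4", "5", "6"]
def pvHIGH : List String := ["10", "J", "Q", "K", "A"]

def freqStep (shuffle : List String) (f : PySem.Dict String Int) (i : Int) :
    PySem.Dict String Int :=
  match PySem.List.pyGet? shuffle i with
  | none => f            -- IndexError (excluded by Pre_)
  | some card => f.insert card (f.getD card 0 + 1)

def counting_card_alt (cards_delt : Int) (shuffle : List String) : Int :=
  let freq := (PySem.List.pyRange 0 cards_delt 1).foldl (freqStep shuffle) PySem.Dict.empty
  (pvLOW.foldl (fun s c => s + freq.getD c 0) 0)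
    - (pvHIGH.foldl (fun s c => s + freq.getD c 0) 0)

-- ===== PRECONDITION & SPEC =====
def pvKEYS : List String :=
  ["A", "2", "3", "4", "5", "6", "7", "8", "9", "10", "J", "Q", "K"]

-- Pre_ excludes exactly the inputs where A raises: cards_delt beyond the list length
-- (IndexError) and a dealt card outside the 13 card names (KeyError).
def Pre_counting_card (cards_delt : Int) (shuffle : List String) : Prop :=
  cards_delt ≤ (shuffle.length : Int) ∧
    ∀ c ∈ shuffle.take cards_delt.toNat, c ∈ pvKEYS
instance (cards_delt : Int) (shuffle : List String) :
    Decidable (Pre_counting_card cards_delt shuffle) := by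
  unfold Pre_counting_card; infer_instance

def pvWitness_counting_card : Int × List String := (3, ["A", "7", "5", "K"])

def Spec_counting_card (cards_delt : Int) (shuffle : List String) (out : Int) : Prop :=
  out = counting_card_alt cards_delt shuffle
instance (cards_delt : Int) (shuffle : List String) (out : Int) :
    Decidable (Spec_counting_card cards_delt shuffle out) := by
  unfold Spec_counting_card; infer_instance

-- ===== CLAIM (what is proved, stated in full; the proofs are below) =====
def Claim_equal_counting_card : Prop := ∀ (cards_delt : Int) (shuffle : List String), Dom_counting_card cards_delt shuffle → Pre_counting_card cards_delt shuffle → Spec_counting_card cards_delt shuffle (counting_card cards_delt shuffle)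

-- ===== LEMMAS AND PROOFS =====

-- the high-low score of one card
def score (c : String) : Int := if c ∈ pvLOW then 1 else if c ∈ pvHIGH then -1 else 0

def Fval (f : PySem.Dict String Int) : Int :=
  (pvLOW.foldl (fun s c => s + f.getD c 0) 0) - (pvHIGH.foldl (fun s c => s + f.getD c 0) 0)

theorem Fval_insert (f : PySem.Dict String Int) (card : String) :
    Fval (f.insert card (f.getD card 0 + 1)) = Fval f + score card := by
  by_cases hl : card ∈ pvLOW
  · simp only [pvLOW, List.mem_cons, List.not_mem_nil, or_false] at hl
    rcases hl with h | h | h | h | h <;> subst h <;>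
      simp [Fval, score, pvLOW, pvHIGH, List.foldl, PySem.Dict.getD_insert] <;> ring
  · by_cases hh : card ∈ pvHIGH
    · simp only [pvHIGH, List.mem_cons, List.not_mem_nil, or_false] at hh
      rcases hh with h | h | h | h | h <;> subst h <;>
        simp [Fval, score, pvLOW, pvHIGH, List.foldl, PySem.Dict.getD_insert] <;> ring
    · simp only [pvLOW, pvHIGH, List.mem_cons, List.not_mem_nil, or_false, not_or] at hl hh
      obtain ⟨a2, a3, a4, a5, a6⟩ := hl
      obtain ⟨b10, bJ, bQ, bK, bA⟩ := hh
      simp [Fval, score, pvLOW, pvHIGH, List.foldl, PySem.Dict.getD_insert,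
        Ne.symm a2, Ne.symm a3, Ne.symm a4, Ne.symm a5, Ne.symm a6,
        Ne.symm b10, Ne.symm bJ, Ne.symm bQ, Ne.symm bK, Ne.symm bA,
        a2, a3, a4, a5, a6, b10, bJ, bQ, bK, bA]

theorem Fval_fold (shuffle : List String) (n : ℕ) (hn : n ≤ shuffle.length) :
    Fval ((PySem.List.pyRange 0 (n : Int) 1).foldl (freqStep shuffle) PySem.Dict.empty)
      = ((shuffle.take n).map score).sum := by
  induction n with
  | zero => simp [Fval, pvLOW, pvHIGH, List.foldl,
      PySem.Dict.getD, PySem.Dict.get?, PySem.Dict.empty]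
  | succ m ih =>
    have hm : m ≤ shuffle.length := Nat.le_of_succ_le hn
    have hmlt : m < shuffle.length := hn
    have hsplit : PySem.List.pyRange 0 ((m + 1 : ℕ) : Int) 1
        = PySem.List.pyRange 0 (m : Int) 1 ++ [(m : Int)] := by
      push_cast
      exact PySem.List.pyRange_one_succ_right (by positivity)
    have hget : PySem.List.pyGet? shuffle ((m : ℕ) : Int) = some shuffle[m] := by
      simp [PySem.List.pyGet?_natCast, List.getElem?_eq_getElem hmlt]
    rw [hsplit, List.foldl_append]
    simp only [List.foldl, freqStep, hget]
    rw [Fval_insert, ih hm]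
    have hml : m < (shuffle.map score).length := by simpa using hmlt
    have := List.sum_take_succ (shuffle.map score) m hml
    simp only [List.map_take] at this ⊢
    rw [this]
    simp

theorem deck_lookup (card : String) (h : card ∈ pvKEYS) :
    ∃ e v, (deck_amount 1).get? card = some e ∧ PySem.List.pyGet? e 1 = some v ∧
      (if v > 9 then (-1 : Int) else if v < 7 then 1 else 0) = score card := by
  simp only [pvKEYS, List.mem_cons, List.not_mem_nil, or_false] at h
  rcases h with h|h|h|h|h|h|h|h|h|h|h|h|h <;> subst h
  · exact ⟨[4, 11, 1], 11, by decide, by decide, by decide⟩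
  · exact ⟨[4, 2, 2], 2, by decide, by decide, by decide⟩
  · exact ⟨[4, 3, 3], 3, by decide, by decide, by decide⟩
  · exact ⟨[4, 4, 4], 4, by decide, by decide, by decide⟩
  · exact ⟨[4, 5, 5], 5, by decide, by decide, by decide⟩
  · exact ⟨[4, 6, 6], 6, by decide, by decide, by decide⟩
  · exact ⟨[4, 7, 7], 7, by decide, by decide, by decide⟩
  · exact ⟨[4, 8, 8], 8, by decide, by decide, by decide⟩
  · exact ⟨[4, 9, 9], 9, by decide, by decide, by decide⟩
  · exact ⟨[4, 10, 10], 10, by decide, by decide, by decide⟩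
  · exact ⟨[4, 10, 10], 10, by decide, by decide, by decide⟩
  · exact ⟨[4, 10, 10], 10, by decide, by decide, by decide⟩
  · exact ⟨[4, 10, 10], 10, by decide, by decide, by decide⟩

theorem ccLoop_eq (shuffle : List String) (cd : Int)
    (hlen : cd ≤ (shuffle.length : Int))
    (hk : ∀ c ∈ shuffle.take cd.toNat, c ∈ pvKEYS) :
    ∀ (n : ℕ) (i hlc : Int), 0 ≤ i → i + n = cd →
      ccLoop cd shuffle (deck_amount 1) hlc i
        = hlc + (((shuffle.take cd.toNat).drop i.toNat).map score).sum := by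
  intro n
  induction n with
  | zero =>
    intro i hlc h0 hi
    rw [ccLoop]
    rw [dif_neg (by omega)]
    have : (shuffle.take cd.toNat).drop i.toNat = [] := by
      apply List.drop_eq_nil_of_le
      simp; omega
    simp [this]
  | succ n ih =>
    intro i hlc h0 hi
    have hlt : i < cd := by omega
    have hilen : i < (shuffle.length : Int) := by omega
    have hgi : PySem.List.pyGet? shuffle i = some shuffle[i.toNat] :=
      PySem.List.pyGet?_eq_some_getElem _ h0 hilen
    have hitake : i.toNat < (shuffle.take cd.toNat).length := by simp; omega
    have hmem : shuffle[i.toNat] ∈ shuffle.take cd.toNat := by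
      have := List.getElem_mem hitake
      rwa [List.getElem_take] at this
    obtain ⟨e, v, he, hv, hs⟩ := deck_lookup _ (hk _ hmem)
    have hdrop : (shuffle.take cd.toNat).drop i.toNat
        = shuffle[i.toNat] :: ((shuffle.take cd.toNat).drop (i.toNat + 1)) := by
      rw [List.drop_eq_getElem_cons hitake, List.getElem_take]
    have hnat : (i + 1).toNat = i.toNat + 1 := by omega
    rw [ccLoop]
    rw [dif_pos hlt]
    simp only [hgi, he, hv]
    split_ifs with h9 h7
    · rw [if_pos h9] at hs
      rw [ih (i + 1) (hlc + -1) (by omega) (by omega), hdrop, hnat]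
      simp
      linarith
    · rw [if_neg h9, if_pos h7] at hs
      rw [ih (i + 1) (hlc + 1) (by omega) (by omega), hdrop, hnat]
      simp
      linarith
    · rw [if_neg h9, if_neg h7] at hs
      rw [ih (i + 1) hlc (by omega) (by omega), hdrop, hnat]
      simp
      linarith

theorem counting_card_spec : Claim_equal_counting_card := by
  intro cd sh _ hp
  obtain ⟨hlen, hk⟩ := hp
  unfold Spec_counting_card counting_card counting_card_alt
  show ccLoop cd sh (deck_amount 1) 0 0
      = Fval ((PySem.List.pyRange 0 cd 1).foldl (freqStep sh) PySem.Dict.empty)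
  by_cases hcd : 0 ≤ cd
  · have hcast : ((cd.toNat : ℕ) : Int) = cd := by omega
    have h1 := ccLoop_eq sh cd hlen hk cd.toNat 0 0 le_rfl (by omega)
    have h2 := Fval_fold sh cd.toNat (by omega)
    rw [hcast] at h2
    rw [h1, h2]
    simp
  · have hnil : PySem.List.pyRange 0 cd 1 = [] :=
      PySem.List.pyRange_one_eq_nil (by omega)
    rw [ccLoop, dif_neg (by omega), hnil]
    simp only [List.foldl_nil]
    decide
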